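-- pv_equiv track=rewrite | github.com/CartoDB/analytics-toolbox-core | gateway/functions/quadbin/quadbin_polyfill/code/lambda/python/handler.py | quadbin_from_zxy
-- ===== SOURCE A (Python) =====
-- from typing import List, Optional, Dict, Any
--
-- def quadbin_from_zxy(z: int, x: int, y: int) -> Optional[int]:
--     """
--     Convert z/x/y tile coordinates to quadbin index.
--
--     Args:
--         z: Zoom level (0-26)
--         x: Tile x coordinate
--         y: Tile y coordinate
--
--     Returns:
--         Quadbin index as integer, or None if invalid
--     """
--     if z < 0 or z > 26:
--         return None
--     if x < 0 or x >= (1 << z) or y < 0 or y >= (1 << z):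
--         return None
--
--     # Quadbin encoding: interleave x and y bits
--     quadbin = z
--     for i in range(z):
--         bit_x = (x >> (z - i - 1)) & 1
--         bit_y = (y >> (z - i - 1)) & 1
--         quadbin = (quadbin << 2) | (bit_y << 1) | bit_x
--
--     return quadbin
-- ===== SOURCE B (Python) =====
-- # Table-driven quadbin encoder: spread bits a byte at a time with a
-- # precomputed 256-entry Morton table instead of looping over all z bits.
-- _SPREAD = []
-- for _b in range(256):
--     _s = 0
--     for _i in range(8):
--         _s |= ((_b >> _i) & 1) << (2 * _i)
--     _SPREAD.append(_s)
--
--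
-- def quadbin_from_zxy(z, x, y):
--     if z < 0 or z > 26:
--         return None
--     if x < 0 or x >= (1 << z) or y < 0 or y >= (1 << z):
--         return None
--     sx = (_SPREAD[x & 255]
--           + (_SPREAD[(x >> 8) & 255] << 16)
--           + (_SPREAD[(x >> 16) & 255] << 32)
--           + (_SPREAD[x >> 24] << 48))
--     sy = (_SPREAD[y & 255]
--           + (_SPREAD[(y >> 8) & 255] << 16)
--           + (_SPREAD[(y >> 16) & 255] << 32)
--           + (_SPREAD[y >> 24] << 48))
--     return (z << (2 * z)) + (sy << 1) + sx
-- ===== Notes on version B (the rewrite author's own statement) =====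
-- stated objective: alternative
-- what changed: Replaced A's per-bit MSB-first interleaving loop by a table-driven Morton encoder: a precomputed 256-entry byte-spread table is combined once per 8-bit chunk of x and y, and the zoom header is added in closed form as z << 2z.
import Mathlib
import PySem

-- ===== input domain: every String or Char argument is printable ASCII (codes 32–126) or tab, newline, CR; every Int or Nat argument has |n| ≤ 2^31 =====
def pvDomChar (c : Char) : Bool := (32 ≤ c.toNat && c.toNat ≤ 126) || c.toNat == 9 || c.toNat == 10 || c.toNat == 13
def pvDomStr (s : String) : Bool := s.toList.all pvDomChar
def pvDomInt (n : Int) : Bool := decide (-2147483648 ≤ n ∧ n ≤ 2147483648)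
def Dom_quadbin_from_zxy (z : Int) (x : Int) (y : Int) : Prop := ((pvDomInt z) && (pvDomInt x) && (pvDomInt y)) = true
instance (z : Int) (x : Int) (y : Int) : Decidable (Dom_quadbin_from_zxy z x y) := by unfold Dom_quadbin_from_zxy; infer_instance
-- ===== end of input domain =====

-- B replaces A's per-bit interleaving loop by a precomputed 256-entry byte-spread
-- table combined byte by byte (objective: alternative table-driven algorithm).

-- ===== PORT A =====
-- After the guards z, x, y are nonnegative, so the loop is computed in Nat (exact);
-- Python's `1 << z` is `(1 <<< z.toNat : Nat)`.
def quadbin_from_zxy (z : Int) (x : Int) (y : Int) : Option Int :=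
  if z < 0 ∨ z > 26 then none
  else if x < 0 ∨ ((1 <<< z.toNat : Nat) : Int) ≤ x ∨ y < 0 ∨ ((1 <<< z.toNat : Nat) : Int) ≤ y then none
  else
    let n := z.toNat
    let a := x.toNat
    let b := y.toNat
    let q := (List.range n).foldl (fun q i =>
      let bitX := (a >>> (n - i - 1)) &&& 1
      let bitY := (b >>> (n - i - 1)) &&& 1
      ((q <<< 2) ||| (bitY <<< 1)) ||| bitX) n
    some (q : Int)

-- ===== PORT B =====
-- module-level table _SPREAD: each byte value with its bits spread to even positions
def pvSpreadTable : List Nat :=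
  (List.range 256).foldl (fun acc b =>
    acc ++ [(List.range 8).foldl (fun s i => s ||| (((b >>> i) &&& 1) <<< (2 * i))) 0]) []

-- Same guards as A; every table index is < 256, so `getD _ 0` is the exact list indexing.
def quadbin_from_zxy_alt (z : Int) (x : Int) (y : Int) : Option Int :=
  if z < 0 ∨ z > 26 then none
  else if x < 0 ∨ ((1 <<< z.toNat : Nat) : Int) ≤ x ∨ y < 0 ∨ ((1 <<< z.toNat : Nat) : Int) ≤ y then none
  else
    let n := z.toNat
    let a := x.toNat
    let b := y.toNat
    let sx := pvSpreadTable.getD (a &&& 255) 0 + (pvSpreadTable.getD ((a >>> 8) &&& 255) 0 <<< 16)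
            + (pvSpreadTable.getD ((a >>> 16) &&& 255) 0 <<< 32) + (pvSpreadTable.getD (a >>> 24) 0 <<< 48)
    let sy := pvSpreadTable.getD (b &&& 255) 0 + (pvSpreadTable.getD ((b >>> 8) &&& 255) 0 <<< 16)
            + (pvSpreadTable.getD ((b >>> 16) &&& 255) 0 <<< 32) + (pvSpreadTable.getD (b >>> 24) 0 <<< 48)
    some (((n <<< (2 * n)) + (sy <<< 1) + sx : Nat) : Int)

-- ===== PRECONDITION & SPEC =====
def Spec_quadbin_from_zxy (z : Int) (x : Int) (y : Int) (out : Option Int) : Prop := out = quadbin_from_zxy_alt z x y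
instance (z : Int) (x : Int) (y : Int) (out : Option Int) : Decidable (Spec_quadbin_from_zxy z x y out) := by unfold Spec_quadbin_from_zxy; infer_instance

-- ===== CLAIM (what is proved, stated in full; the proofs are below) =====
def Claim_equal_quadbin_from_zxy : Prop := ∀ (z : Int) (x : Int) (y : Int), Dom_quadbin_from_zxy z x y → Spec_quadbin_from_zxy z x y (quadbin_from_zxy z x y)

-- ===== LEMMAS AND PROOFS =====

/-- The common value both programs compute around: the low `n` bits of `v`
spread to the even bit positions, i.e. `∑ j < n, bit j(v) · 4^j`. -/
def pvE (n v : Nat) : Nat := ∑ j ∈ Finset.range n, (v.testBit j).toNat * 4 ^ j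

lemma pvE_lt (n v : Nat) : pvE n v < 4 ^ n := by
  induction n with
  | zero => simp [pvE]
  | succ n ih =>
    have ht : (v.testBit n).toNat ≤ 1 := by cases v.testBit n <;> simp
    unfold pvE at ih ⊢
    rw [Finset.sum_range_succ]
    have h4 : (4:Nat) ^ (n+1) = 4 * 4 ^ n := by ring
    rw [h4]
    rcases Nat.le_one_iff_eq_zero_or_eq_one.mp ht with h | h <;> rw [h] <;> omega

/-- `a <<< k ||| b = 2^k·a + b` when `b < 2^k` (disjoint bits). -/
lemma pvLorDisj (a b k : Nat) (hb : b < 2 ^ k) : (a <<< k) ||| b = 2 ^ k * a + b := by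
  apply Nat.eq_of_testBit_eq
  intro i
  rw [Nat.testBit_lor, Nat.testBit_shiftLeft, Nat.testBit_two_pow_mul_add a hb]
  by_cases hi : i < k
  · simp [hi, Nat.not_le.mpr hi]
  · have hbi : b.testBit i = false :=
      Nat.testBit_eq_false_of_lt (lt_of_lt_of_le hb (Nat.pow_le_pow_right (by norm_num) (Nat.le_of_not_lt hi)))
    simp [hi, Nat.le_of_not_lt hi, hbi]

/-- A's loop body: `((q<<2) | (u<<1)) | w = 4q + 2u + w` for bits `u, w`. -/
lemma pvCombine (q u w : Nat) (hu : u ≤ 1) (hw : w ≤ 1) :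
    ((q <<< 2) ||| (u <<< 1)) ||| w = 4 * q + 2 * u + w := by
  rw [Nat.lor_assoc]
  have h1 : (u <<< 1) ||| w = 2 * u + w := by
    interval_cases u <;> interval_cases w <;> decide
  rw [h1, pvLorDisj q (2 * u + w) 2 (by omega)]
  ring

lemma pvBit (v s : Nat) : (v >>> s) &&& 1 = (v.testBit s).toNat := by
  rw [Nat.and_one_is_mod, Nat.toNat_testBit, Nat.shiftRight_eq_div_pow]

lemma pvBit_le (v s : Nat) : (v >>> s) &&& 1 ≤ 1 := by
  rw [pvBit]; cases v.testBit s <;> simp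

/-- A's loop, generalized over a bit offset `s` and the accumulator. -/
lemma pvLoopA (a b : Nat) : ∀ (m s acc : Nat),
    (List.range m).foldl (fun q i =>
      let bitX := (a >>> (s + (m - i - 1))) &&& 1
      let bitY := (b >>> (s + (m - i - 1))) &&& 1
      ((q <<< 2) ||| (bitY <<< 1)) ||| bitX) acc
    = acc * 4 ^ m + ∑ j ∈ Finset.range m, ((a.testBit (s + j)).toNat + 2 * (b.testBit (s + j)).toNat) * 4 ^ j := by
  intro m
  induction m with
  | zero => intro s acc; simp
  | succ m ih =>
    intro s acc
    rw [List.range_succ, List.foldl_append]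
    have hext : (List.range m).foldl (fun q i =>
        let bitX := (a >>> (s + (m + 1 - i - 1))) &&& 1
        let bitY := (b >>> (s + (m + 1 - i - 1))) &&& 1
        ((q <<< 2) ||| (bitY <<< 1)) ||| bitX) acc
      = (List.range m).foldl (fun q i =>
        let bitX := (a >>> ((s + 1) + (m - i - 1))) &&& 1
        let bitY := (b >>> ((s + 1) + (m - i - 1))) &&& 1
        ((q <<< 2) ||| (bitY <<< 1)) ||| bitX) acc := by
      apply List.foldl_ext
      intro q i hi
      have hi' : i < m := List.mem_range.mp hi
      have h : s + (m + 1 - i - 1) = (s + 1) + (m - i - 1) := by omega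
      dsimp only
      rw [h]
    rw [hext, ih (s + 1) acc]
    simp only [List.foldl_cons, List.foldl_nil]
    have hidx : s + (m + 1 - m - 1) = s := by omega
    rw [hidx, pvCombine _ _ _ (pvBit_le b s) (pvBit_le a s), pvBit, pvBit]
    rw [Finset.sum_range_succ' (fun j => ((a.testBit (s + j)).toNat + 2 * (b.testBit (s + j)).toNat) * 4 ^ j) m]
    have hre : ∀ j, s + (j + 1) = (s + 1) + j := by omega
    have hmul : (∑ j ∈ Finset.range m, ((a.testBit (s + (j + 1))).toNat + 2 * (b.testBit (s + (j + 1))).toNat) * 4 ^ (j + 1))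
        = 4 * ∑ j ∈ Finset.range m, ((a.testBit ((s + 1) + j)).toNat + 2 * (b.testBit ((s + 1) + j)).toNat) * 4 ^ j := by
      rw [Finset.mul_sum]
      apply Finset.sum_congr rfl
      intro j _
      rw [hre j]
      ring
    rw [hmul]
    simp only [Nat.add_zero, pow_zero, pow_succ]
    ring

/-- The table-building fold is a `map`. -/
lemma pvFoldAppend (f : Nat → Nat) : ∀ (l : List Nat) (acc : List Nat),
    l.foldl (fun acc b => acc ++ [f b]) acc = acc ++ l.map f := by
  intro l
  induction l with
  | nil => intro acc; simp
  | cons h t ih => intro acc; simp [ih]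

/-- The inner spreading fold computes `pvE m b`. -/
lemma pvSpread8 (b : Nat) : ∀ (m : Nat),
    (List.range m).foldl (fun s i => s ||| (((b >>> i) &&& 1) <<< (2 * i))) 0 = pvE m b := by
  intro m
  induction m with
  | zero => simp [pvE]
  | succ m ih =>
    rw [List.range_succ, List.foldl_append, ih]
    simp only [List.foldl_cons, List.foldl_nil]
    have hlt : pvE m b < 2 ^ (2 * m) := by
      have : (2:Nat) ^ (2 * m) = 4 ^ m := by rw [pow_mul]; norm_num
      rw [this]; exact pvE_lt m b
    rw [Nat.lor_comm, pvLorDisj _ _ _ hlt, pvBit]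
    unfold pvE
    rw [Finset.sum_range_succ]
    have : (2:Nat) ^ (2 * m) = 4 ^ m := by rw [pow_mul]; norm_num
    rw [this]
    ring

lemma pvTable (c : Nat) (hc : c < 256) : pvSpreadTable.getD c 0 = pvE 8 c := by
  unfold pvSpreadTable
  rw [pvFoldAppend (fun b => (List.range 8).foldl (fun s i => s ||| (((b >>> i) &&& 1) <<< (2 * i))) 0)]
  rw [List.nil_append, List.getD_eq_getElem?_getD, List.getElem?_map, List.getElem?_range hc,
    Option.map_some, Option.getD_some]
  exact pvSpread8 c 8

lemma pvE_add (k m v : Nat) : pvE (k + m) v = pvE k (v % 2 ^ k) + 4 ^ k * pvE m (v >>> k) := by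
  unfold pvE
  rw [Finset.sum_range_add]
  congr 1
  · apply Finset.sum_congr rfl
    intro j hj
    rw [Nat.testBit_mod_two_pow]
    simp [List.mem_range.mp (by simpa using hj)]
  · rw [Finset.mul_sum]
    apply Finset.sum_congr rfl
    intro j _
    rw [Nat.testBit_shiftRight, pow_add]
    ring

lemma pvE_trunc (v n m : Nat) (hv : v < 2 ^ n) (h : n ≤ m) : pvE m v = pvE n v := by
  obtain ⟨d, rfl⟩ := Nat.exists_eq_add_of_le h
  unfold pvE
  rw [Finset.sum_range_add]
  have hz : ∀ i, v.testBit (n + i) = false := fun i =>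
    Nat.testBit_eq_false_of_lt (lt_of_lt_of_le hv (Nat.pow_le_pow_right (by norm_num) (Nat.le_add_right n i)))
  simp [hz]

/-- B's four-chunk table combination equals `pvE 32`. -/
lemma pvChunks (a : Nat) (ha : a < 2 ^ 32) :
    pvSpreadTable.getD (a &&& 255) 0 + (pvSpreadTable.getD ((a >>> 8) &&& 255) 0 <<< 16)
      + (pvSpreadTable.getD ((a >>> 16) &&& 255) 0 <<< 32) + (pvSpreadTable.getD (a >>> 24) 0 <<< 48)
    = pvE 32 a := by
  have h255 : (255 : Nat) = 2 ^ 8 - 1 := rfl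
  have hm : ∀ w : Nat, w &&& 255 = w % 2 ^ 8 := fun w => by
    rw [h255, Nat.and_two_pow_sub_one_eq_mod]
  have hlt : ∀ w : Nat, w % 2 ^ 8 < 256 := fun w => Nat.mod_lt _ (by norm_num)
  have h24 : a >>> 24 < 256 := by
    rw [Nat.shiftRight_eq_div_pow]
    have e1 : (2:Nat) ^ 24 = 16777216 := by norm_num
    have e2 : (2:Nat) ^ 32 = 4294967296 := by norm_num
    rw [e1]; rw [e2] at ha; omega
  rw [hm a, hm (a >>> 8), hm (a >>> 16)]
  rw [pvTable _ (hlt a), pvTable _ (hlt (a >>> 8)), pvTable _ (hlt (a >>> 16)), pvTable _ h24]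
  have e1 : pvE 32 a = pvE 8 (a % 2 ^ 8) + 4 ^ 8 * pvE 24 (a >>> 8) := pvE_add 8 24 a
  have e2 : pvE 24 (a >>> 8) = pvE 8 ((a >>> 8) % 2 ^ 8) + 4 ^ 8 * pvE 16 (a >>> 8 >>> 8) := pvE_add 8 16 _
  have e3 : pvE 16 (a >>> 8 >>> 8) = pvE 8 ((a >>> 8 >>> 8) % 2 ^ 8) + 4 ^ 8 * pvE 8 (a >>> 8 >>> 8 >>> 8) := pvE_add 8 8 _
  have s16 : a >>> 8 >>> 8 = a >>> 16 := by rw [← Nat.shiftRight_add]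
  have s24 : a >>> 16 >>> 8 = a >>> 24 := by rw [← Nat.shiftRight_add]
  rw [s16] at e2 e3
  rw [s24] at e3
  have c1 : (4:Nat) ^ 8 = 2 ^ 16 := by norm_num
  rw [e1, e2, e3, c1]
  simp only [Nat.shiftLeft_eq]
  ring_nf

-- ===== VERDICT (by name: the statement is the Claim_ definition above) =====
theorem quadbin_from_zxy_spec : Claim_equal_quadbin_from_zxy := by
  intro z x y _
  unfold Spec_quadbin_from_zxy quadbin_from_zxy quadbin_from_zxy_alt
  split_ifs with h1 h2
  · rfl
  · rfl
  · -- valid branch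
    dsimp only
    rw [Option.some.injEq, Int.natCast_inj]
    push Not at h1 h2
    obtain ⟨hz0, hz26⟩ := h1
    obtain ⟨hx0, hxlt, hy0, hylt⟩ := h2
    set n := z.toNat with hn
    have hsl : (1 <<< n : Nat) = 2 ^ n := by rw [Nat.shiftLeft_eq, one_mul]
    rw [hsl] at hxlt hylt
    have ha : x.toNat < 2 ^ n := by omega
    have hb : y.toNat < 2 ^ n := by omega
    have hn26 : n ≤ 26 := by omega
    set a := x.toNat
    set b := y.toNat
    -- A's loop
    have hA : (List.range n).foldl (fun q i =>
        let bitX := (a >>> (n - i - 1)) &&& 1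
        let bitY := (b >>> (n - i - 1)) &&& 1
        ((q <<< 2) ||| (bitY <<< 1)) ||| bitX) n
      = n * 4 ^ n + ∑ j ∈ Finset.range n, ((a.testBit j).toNat + 2 * (b.testBit j).toNat) * 4 ^ j := by
      have hext : (List.range n).foldl (fun q i =>
          let bitX := (a >>> (n - i - 1)) &&& 1
          let bitY := (b >>> (n - i - 1)) &&& 1
          ((q <<< 2) ||| (bitY <<< 1)) ||| bitX) n
        = (List.range n).foldl (fun q i =>
          let bitX := (a >>> (0 + (n - i - 1))) &&& 1
          let bitY := (b >>> (0 + (n - i - 1))) &&& 1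
          ((q <<< 2) ||| (bitY <<< 1)) ||| bitX) n := by
        apply List.foldl_ext
        intro q i _
        simp only [Nat.zero_add]
      rw [hext, pvLoopA a b n 0 n]
      simp only [Nat.zero_add]
    rw [hA]
    -- B's chunks
    have h32 : (2:Nat) ^ n ≤ 2 ^ 32 := Nat.pow_le_pow_right (by norm_num) (by omega)
    have hBx := pvChunks a (lt_of_lt_of_le ha h32)
    have hBy := pvChunks b (lt_of_lt_of_le hb h32)
    rw [hBx, hBy]
    rw [pvE_trunc a n 32 ha (by omega), pvE_trunc b n 32 hb (by omega)]
    -- combine sums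
    have hsum : ∑ j ∈ Finset.range n, ((a.testBit j).toNat + 2 * (b.testBit j).toNat) * 4 ^ j
        = pvE n a + 2 * pvE n b := by
      unfold pvE
      rw [Finset.mul_sum, ← Finset.sum_add_distrib]
      apply Finset.sum_congr rfl
      intro j _
      ring
    rw [hsum]
    simp only [Nat.shiftLeft_eq]
    have h4 : (2:Nat) ^ (2 * n) = 4 ^ n := by rw [pow_mul]; norm_num
    rw [h4]
    ring
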